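-- pv_equiv track=rewrite | github.com/clutchitggs/hunter-max-oss | src/react_agent.py | select_tests
-- ===== SOURCE A (Python) =====
-- VULN_ENDPOINT_SIGNALS = {
--     "mass_assignment": {
--         "keywords": ["register", "signup", "create", "update", "profile", "account", "user", "settings", "invite"],
--         "methods": ["POST", "PUT", "PATCH"],
--     },
--     "ssrf": {
--         "keywords": ["url", "fetch", "proxy", "webhook", "callback", "link", "import", "upload", "preview", "share"],
--         "methods": ["GET", "POST"],
--     },
--     "auth_bypass": {
--         "keywords": ["admin", "dashboard", "internal", "manage", "config", "settings", "panel", "api"],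
--         "methods": ["GET", "POST"],
--     },
--     "open_redirect": {
--         "keywords": ["login", "logout", "redirect", "return", "callback", "oauth", "auth", "sso", "next", "goto"],
--         "methods": ["GET"],
--     },
-- }
--
-- def select_tests(api_schemas_rows):
--     """Given a list of api_schema rows, select which endpoints to test for which vuln classes.
--     Returns list of (endpoint_info, vuln_class) pairs."""
--     tests = []
--
--     for row in api_schemas_rows:
--         endpoint = row.get("endpoint", "").lower()
--         method = row.get("method", "GET").upper()
--
--         for vuln_class, signals in VULN_ENDPOINT_SIGNALS.items():
--             # Check if endpoint matches this vuln class
--             keyword_match = any(kw in endpoint for kw in signals["keywords"])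
--             method_match = method in signals["methods"]
--
--             if keyword_match and method_match:
--                 tests.append((row, vuln_class))
--
--     # Deduplicate: max 3 tests per vuln class per target (cost control)
--     seen = {}
--     filtered = []
--     for row, vuln_class in tests:
--         count = seen.get(vuln_class, 0)
--         if count < 3:
--             filtered.append((row, vuln_class))
--             seen[vuln_class] = count + 1
--
--     return filtered
-- ===== SOURCE B (Python) =====
-- VULN_ENDPOINT_SIGNALS = {
--     "mass_assignment": {
--         "keywords": ["register", "signup", "create", "update", "profile", "account", "user", "settings", "invite"],
--         "methods": ["POST", "PUT", "PATCH"],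
--     },
--     "ssrf": {
--         "keywords": ["url", "fetch", "proxy", "webhook", "callback", "link", "import", "upload", "preview", "share"],
--         "methods": ["GET", "POST"],
--     },
--     "auth_bypass": {
--         "keywords": ["admin", "dashboard", "internal", "manage", "config", "settings", "panel", "api"],
--         "methods": ["GET", "POST"],
--     },
--     "open_redirect": {
--         "keywords": ["login", "logout", "redirect", "return", "callback", "oauth", "auth", "sso", "next", "goto"],
--         "methods": ["GET"],
--     },
-- }
--
-- def select_tests(api_schemas_rows):
--     """Class-outer selection: for each vuln class scan the rows and keep only its
--     first 3 matches (early break), then a stable sort on (row index, class index)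
--     restores the row-major output order. No counter dict, no full match list."""
--     picks = []
--     for ci, (vc, signals) in enumerate(VULN_ENDPOINT_SIGNALS.items()):
--         hits = []
--         for ri, row in enumerate(api_schemas_rows):
--             endpoint = row.get("endpoint", "").lower()
--             method = row.get("method", "GET").upper()
--             if (any(kw in endpoint for kw in signals["keywords"])
--                     and method in signals["methods"]):
--                 hits.append((ri, ci, (row, vc)))
--                 if len(hits) == 3:
--                     break
--         picks.extend(hits)
--     picks.sort(key=lambda t: (t[0], t[1]))
--     return [pair for _, _, pair in picks]
-- ===== Notes on version B (the rewrite author's own statement) =====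
-- stated objective: alternative
-- what changed: Replaces A's row-major collect-then-cap with a class-outer algorithm: per vuln class scan the rows taking only its first 3 matches (early break), then a stable sort on (row index, class index) restores the row-major order; the counter dict and the intermediate full match list disappear.
import Mathlib
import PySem

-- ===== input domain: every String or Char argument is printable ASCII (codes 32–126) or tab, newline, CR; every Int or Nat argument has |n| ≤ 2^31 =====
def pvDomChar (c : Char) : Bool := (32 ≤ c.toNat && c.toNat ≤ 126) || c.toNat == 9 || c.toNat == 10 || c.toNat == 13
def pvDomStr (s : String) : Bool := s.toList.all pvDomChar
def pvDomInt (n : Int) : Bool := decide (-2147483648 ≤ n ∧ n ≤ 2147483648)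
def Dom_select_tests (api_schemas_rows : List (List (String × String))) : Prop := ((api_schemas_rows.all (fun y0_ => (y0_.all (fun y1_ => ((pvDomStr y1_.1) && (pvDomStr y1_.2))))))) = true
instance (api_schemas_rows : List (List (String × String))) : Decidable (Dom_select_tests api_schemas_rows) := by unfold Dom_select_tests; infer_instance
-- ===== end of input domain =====

-- B replaces A's row-major collect-then-cap with a class-outer selection (first 3 matches per class, early break)
-- followed by a stable sort on (row index, class index); same output, no counter dict (objective: alternative).

-- the module constant VULN_ENDPOINT_SIGNALS, in insertion order: (vuln_class, (keywords, methods))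
def pvSignals : List (String × (List String × List String)) :=
  [ ("mass_assignment", (["register", "signup", "create", "update", "profile", "account", "user", "settings", "invite"],
                         ["POST", "PUT", "PATCH"])),
    ("ssrf", (["url", "fetch", "proxy", "webhook", "callback", "link", "import", "upload", "preview", "share"],
              ["GET", "POST"])),
    ("auth_bypass", (["admin", "dashboard", "internal", "manage", "config", "settings", "panel", "api"],
                     ["GET", "POST"])),
    ("open_redirect", (["login", "logout", "redirect", "return", "callback", "oauth", "auth", "sso", "next", "goto"],
                       ["GET"])) ]

-- ===== PORT A =====
-- body of A's first (collecting) loop, for one row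
def pvA_collect_row (row : List (String × String)) (tests : List ((List (String × String)) × String)) :
    List ((List (String × String)) × String) :=
  let endpoint := PySem.Str.lower (PySem.Dict.getD (PySem.Dict.mk row) "endpoint" "")
  let method := PySem.Str.upper (PySem.Dict.getD (PySem.Dict.mk row) "method" "GET")
  pvSignals.foldl (fun tests sig =>
    let keyword_match := sig.2.1.any (fun kw => PySem.Str.isIn kw endpoint)
    let method_match := sig.2.2.contains method
    if keyword_match && method_match then tests ++ [(row, sig.1)] else tests) tests

-- body of A's second (dedup/cap) loop, for one collected (row, vuln_class) pair
def pvA_cap (st : PySem.Dict String Int × List ((List (String × String)) × String))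
    (t : (List (String × String)) × String) :
    PySem.Dict String Int × List ((List (String × String)) × String) :=
  let count := st.1.getD t.2 0
  if count < 3 then (st.1.insert t.2 (count + 1), st.2 ++ [t]) else st

def select_tests (api_schemas_rows : List (List (String × String))) : List ((List (String × String)) × String) :=
  let tests := api_schemas_rows.foldl (fun tests row => pvA_collect_row row tests) []
  ((tests.foldl (fun st t => pvA_cap st t) (PySem.Dict.empty, [])).2)

-- ===== PORT B =====
-- B's inner scan over enumerate(api_schemas_rows) for one class: append its first 3 matches, `break` at 3
def pvB_hits (remaining : List (Int × List (String × String))) (ci : Int) (vc : String)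
    (kws ms : List String) (hits : List (Int × Int × ((List (String × String)) × String))) :
    List (Int × Int × ((List (String × String)) × String)) :=
  match remaining with
  | [] => hits
  | (ri, row) :: rest =>
    let endpoint := PySem.Str.lower (PySem.Dict.getD (PySem.Dict.mk row) "endpoint" "")
    let method := PySem.Str.upper (PySem.Dict.getD (PySem.Dict.mk row) "method" "GET")
    if kws.any (fun kw => PySem.Str.isIn kw endpoint) && ms.contains method then
      let hits' := hits ++ [(ri, ci, (row, vc))]
      if hits'.length == 3 then hits' else pvB_hits rest ci vc kws ms hits'
    else pvB_hits rest ci vc kws ms hits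

def select_tests_alt (api_schemas_rows : List (List (String × String))) : List ((List (String × String)) × String) :=
  let picks := (PySem.List.enumerate pvSignals).foldl
    (fun picks e => picks ++ pvB_hits (PySem.List.enumerate api_schemas_rows) e.1 e.2.1 e.2.2.1 e.2.2.2 []) []
  (PySem.List.sorted2 picks (fun t => t.1) (fun t => t.2.1)).map (fun t => t.2.2)

-- ===== PRECONDITION & SPEC =====
def Spec_select_tests (api_schemas_rows : List (List (String × String))) (out : List ((List (String × String)) × String)) : Prop := out = select_tests_alt api_schemas_rows
instance (api_schemas_rows : List (List (String × String))) (out : List ((List (String × String)) × String)) : Decidable (Spec_select_tests api_schemas_rows out) := by unfold Spec_select_tests; infer_instance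

-- ===== CLAIM (what is proved, stated in full; the proofs are below) =====
def Claim_equal_select_tests : Prop := ∀ (api_schemas_rows : List (List (String × String))), Dom_select_tests api_schemas_rows → Spec_select_tests api_schemas_rows (select_tests api_schemas_rows)

-- ===== LEMMAS AND PROOFS =====

-- "this signal class matches this row"
def pvMatch (row : List (String × String)) (sig : String × (List String × List String)) : Bool :=
  sig.2.1.any (fun kw => PySem.Str.isIn kw
      (PySem.Str.lower (PySem.Dict.getD (PySem.Dict.mk row) "endpoint" ""))) &&
    sig.2.2.contains (PySem.Str.upper (PySem.Dict.getD (PySem.Dict.mk row) "method" "GET"))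

-- the vuln-class tag of a tagged match
def pvCls (t : Int × Int × ((List (String × String)) × String)) : String := t.2.2.2

-- the (row-order) list of tagged matches of one class
def pvCM (rows : List (List (String × String))) (ci : Int) (sig : String × (List String × List String)) :
    List (Int × Int × ((List (String × String)) × String)) :=
  ((PySem.List.enumerate rows).filter (fun p => pvMatch p.2 sig)).map (fun p => (p.1, ci, (p.2, sig.1)))

-- the row-major tagged match list
def pvMt (rows : List (List (String × String))) : List (Int × Int × ((List (String × String)) × String)) :=
  (PySem.List.enumerate rows).flatMap (fun p =>
    ((PySem.List.enumerate pvSignals).filter (fun e => pvMatch p.2 e.2)).map (fun e => (p.1, e.1, (p.2, e.2.1))))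

def pvBump (f : String → Nat) (c : String) : String → Nat := fun c' => if c' = c then f c + 1 else f c'

-- canonical "first 3 per class" cap, counts as a function
def pvCap {α : Type} (cls : α → String) : List α → (String → Nat) → List α
  | [], _ => []
  | t :: ts, f => if f (cls t) < 3 then t :: pvCap cls ts (pvBump f (cls t)) else pvCap cls ts f


-- the i-th signal entry (proof-side shorthand)
def pvSigAt (i : Nat) : String × (List String × List String) := pvSignals.getD i ("", ([], []))

-- A's collecting loop for one row appends the row's matches
theorem pvA_collect_row_eq (row : List (String × String)) (acc : List ((List (String × String)) × String)) :
    pvA_collect_row row acc = acc ++ (pvSignals.filter (pvMatch row)).map (fun sig => (row, sig.1)) := by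
  simp only [pvA_collect_row]
  rw [PySem.List.foldl_append_if]
  rfl

-- A's tests list is the flatMap of per-row matches
theorem pvA_tests_eq (rows : List (List (String × String))) :
    rows.foldl (fun tests row => pvA_collect_row row tests) []
      = rows.flatMap (fun row => (pvSignals.filter (pvMatch row)).map (fun sig => (row, sig.1))) := by
  
  have h := PySem.List.foldl_congr_mem rows
    (fun tests row => pvA_collect_row row tests)
    (fun tests row => tests ++ (pvSignals.filter (pvMatch row)).map (fun sig => (row, sig.1)))
    ([] : List ((List (String × String)) × String))
    (fun acc x _ => pvA_collect_row_eq x acc)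
  rw [h, PySem.List.foldl_append_eq_flatMap]
  simp

-- A's cap loop with the dict counter is pvCap with a function counter
theorem pvA_cap_eq (L : List ((List (String × String)) × String)) :
    ∀ (d : PySem.Dict String Int) (acc : List ((List (String × String)) × String)) (f : String → Nat),
      (∀ c, d.getD c 0 = (f c : Int)) →
      (L.foldl (fun st t => pvA_cap st t) (d, acc)).2 = acc ++ pvCap (fun t => t.2) L f := by
  
  induction L with
  | nil => intro d acc f h; simp [pvCap]
  | cons t ts ih =>
    intro d acc f h
    rw [List.foldl_cons]
    have hhead : pvA_cap (d, acc) t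
        = if (f t.2 : Int) < 3 then (d.insert t.2 ((f t.2 : Int) + 1), acc ++ [t]) else (d, acc) := by
      simp only [pvA_cap, h t.2]
    by_cases hlt : f t.2 < 3
    · have hd : ∀ c, (d.insert t.2 ((f t.2 : Int) + 1)).getD c 0 = ((pvBump f t.2 c : Nat) : Int) := by
        intro c
        rw [PySem.Dict.getD_insert]
        simp only [pvBump]
        split_ifs with hc
        · push_cast; ring
        · exact h c
      rw [hhead, if_pos (show ((f t.2 : Int) < 3) by exact_mod_cast hlt), ih _ _ _ hd]
      simp [pvCap, hlt]
    · rw [hhead, if_neg (show ¬((f t.2 : Int) < 3) by exact_mod_cast hlt), ih _ _ _ h]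
      simp [pvCap, hlt]

-- dropping the index from a filter-map over enumerate
theorem pv_enum_filter_map {σ β : Type} (l : List σ) (p : σ → Bool) (g : σ → β) :
    ∀ s : Int, ((PySem.List.enumerate l s).filter (fun e => p e.2)).map (fun e => g e.2)
      = (l.filter p).map g := by
  
  induction l with
  | nil => intro s; rfl
  | cons x xs ih =>
    intro s
    rw [PySem.List.enumerate_cons]
    by_cases hx : p x
    · simp [hx, ih (s + 1)]
    · simp [hx, ih (s + 1)]

-- dropping the index from a flatMap over enumerate
theorem pv_enum_flatMap {σ β : Type} (l : List σ) (g : σ → List β) :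
    ∀ s : Int, (PySem.List.enumerate l s).flatMap (fun p => g p.2) = l.flatMap g := by
  
  induction l with
  | nil => intro s; rfl
  | cons x xs ih =>
    intro s
    rw [PySem.List.enumerate_cons]
    simp [List.flatMap_cons, ih (s + 1)]

-- projecting the tags away from pvMt gives A's tests list
set_option maxHeartbeats 1000000 in
theorem pvMt_proj (rows : List (List (String × String))) :
    (pvMt rows).map (fun t => t.2.2)
      = rows.flatMap (fun row => (pvSignals.filter (pvMatch row)).map (fun sig => (row, sig.1))) := by
  
  unfold pvMt
  rw [List.map_flatMap]
  have h1 : ∀ p ∈ PySem.List.enumerate rows,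
      (((PySem.List.enumerate pvSignals).filter (fun e => pvMatch p.2 e.2)).map
          (fun e => (p.1, e.1, (p.2, e.2.1)))).map (fun t => t.2.2)
        = (pvSignals.filter (pvMatch p.2)).map (fun sig => (p.2, sig.1)) := by
    intro p _
    rw [List.map_map]
    exact pv_enum_filter_map pvSignals (pvMatch p.2) (fun sig => (p.2, sig.1)) 0
  refine Eq.trans (List.flatMap_congr h1) ?_
  exact pv_enum_flatMap rows
    (fun row => (pvSignals.filter (pvMatch row)).map (fun sig => (row, sig.1))) 0

-- pvCap commutes with a class-preserving map
theorem pvCap_map {α β : Type} (cls : α → String) (cls' : β → String) (g : β → α)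
    (hg : ∀ x, cls (g x) = cls' x) :
    ∀ (L : List β) (f : String → Nat), pvCap cls (L.map g) f = (pvCap cls' L f).map g := by
  
  intro L
  induction L with
  | nil => intro f; rfl
  | cons x xs ih =>
    intro f
    simp only [List.map_cons, pvCap, hg x]
    by_cases hx : f (cls' x) < 3
    · simp [hx, ih]
    · simp [hx, ih]

-- A's result is the canonical cap of the tagged row-major match list, projected
theorem pvA_canonical (rows : List (List (String × String))) :
    select_tests rows = (pvCap pvCls (pvMt rows) (fun _ => 0)).map (fun t => t.2.2) := by
  
  simp only [select_tests]
  rw [pvA_tests_eq, ← pvMt_proj, pvA_cap_eq _ PySem.Dict.empty [] (fun _ => 0) (fun c => rfl),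
      pvCap_map (fun t => t.2) pvCls (fun t => t.2.2) (fun x => rfl)]
  simp

-- B's scan-with-break takes the first (3 - len hits) matches
theorem pvB_hits_eq (ci : Int) (vc : String) (kws ms : List String) :
    ∀ (L : List (Int × List (String × String))) (hits : List (Int × Int × ((List (String × String)) × String))),
      hits.length < 3 →
      pvB_hits L ci vc kws ms hits
        = hits ++ ((L.filter (fun p => pvMatch p.2 (vc, (kws, ms)))).map
            (fun p => (p.1, ci, (p.2, vc)))).take (3 - hits.length) := by
  
  intro L
  induction L with
  | nil => intro hits h; simp [pvB_hits]
  | cons pr rest ih =>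
    intro hits h
    obtain ⟨ri, row⟩ := pr
    simp only [pvB_hits]
    have hg : (pvMatch row (vc, (kws, ms))) =
        ((kws.any (fun kw => PySem.Str.isIn kw
            (PySem.Str.lower (PySem.Dict.getD (PySem.Dict.mk row) "endpoint" "")))) &&
          ms.contains (PySem.Str.upper (PySem.Dict.getD (PySem.Dict.mk row) "method" "GET"))) := rfl
    by_cases hm : pvMatch row (vc, (kws, ms))
    · rw [if_pos (hg ▸ hm)]
      have hlen : (hits ++ [((ri : Int), ((ci : Int), (row, vc)))]).length = hits.length + 1 := by simp
      by_cases h3 : hits.length + 1 = 3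
      · have hb : ((hits ++ [((ri : Int), ((ci : Int), (row, vc)))]).length == 3) = true := by
          rw [hlen]; exact beq_iff_eq.2 h3
        rw [if_pos hb]
        have : 3 - hits.length = 1 := by omega
        simp [hm, this]
      · have hb : ((hits ++ [((ri : Int), ((ci : Int), (row, vc)))]).length == 3) = false := by
          rw [hlen]; exact beq_eq_false_iff_ne.2 h3
        rw [if_neg (show ¬(((hits ++ [((ri : Int), ((ci : Int), (row, vc)))]).length == 3) = true) by
          simp [hlen]; omega)]
        rw [ih _ (by omega)]
        have hsub : 3 - hits.length = (3 - (hits.length + 1)) + 1 := by omega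
        simp only [List.filter_cons, hm, if_pos, List.map_cons, hsub, List.take_succ_cons, hlen]
        simp
    · rw [if_neg (by rw [← hg]; simp [hm])]
      rw [ih _ h]
      simp [hm]

-- B's picks list
theorem pvB_picks_eq (rows : List (List (String × String))) :
    (PySem.List.enumerate pvSignals).foldl
      (fun picks e => picks ++ pvB_hits (PySem.List.enumerate rows) e.1 e.2.1 e.2.2.1 e.2.2.2 []) []
    = (PySem.List.enumerate pvSignals).flatMap (fun e => (pvCM rows e.1 e.2).take 3) := by
  
  have h : ∀ (acc : List (Int × Int × ((List (String × String)) × String))) (e : Int × (String × (List String × List String))),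
      e ∈ PySem.List.enumerate pvSignals →
      acc ++ pvB_hits (PySem.List.enumerate rows) e.1 e.2.1 e.2.2.1 e.2.2.2 []
        = acc ++ (pvCM rows e.1 e.2).take 3 := by
    intro acc e _
    rw [pvB_hits_eq e.1 e.2.1 e.2.2.1 e.2.2.2 (PySem.List.enumerate rows) [] (by simp)]
    unfold pvCM
    simp
  have h2 := PySem.List.foldl_congr_mem (PySem.List.enumerate pvSignals)
    (fun picks e => picks ++ pvB_hits (PySem.List.enumerate rows) e.1 e.2.1 e.2.2.1 e.2.2.2 [])
    (fun picks e => picks ++ (pvCM rows e.1 e.2).take 3)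
    ([] : List (Int × Int × ((List (String × String)) × String)))
    h
  rw [h2, PySem.List.foldl_append_eq_flatMap]
  simp

-- per-class filter of the cap is the take of the per-class filter
theorem pvCap_filter {α : Type} (cls : α → String) (c : String) :
    ∀ (L : List α) (f : String → Nat),
      (pvCap cls L f).filter (fun t => decide (cls t = c))
        = (L.filter (fun t => decide (cls t = c))).take (3 - f c) := by
  intro L
  induction L with
  | nil => intro f; simp [pvCap]
  | cons t ts ih =>
    intro f
    simp only [pvCap]
    by_cases hc : cls t = c
    · subst hc
      by_cases hlt : f (cls t) < 3
      · rw [if_pos hlt, List.filter_cons_of_pos (by simp), List.filter_cons_of_pos (by simp),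
          ih (pvBump f (cls t))]
        have hb : pvBump f (cls t) (cls t) = f (cls t) + 1 := by simp [pvBump]
        have h1 : 3 - f (cls t) = (3 - (f (cls t) + 1)) + 1 := by omega
        rw [hb, h1, List.take_succ_cons]
      · rw [if_neg hlt, ih f]
        have h1 : 3 - f (cls t) = 0 := by omega
        rw [h1]
        simp
    · by_cases hlt : f (cls t) < 3
      · rw [if_pos hlt, List.filter_cons_of_neg (by simp [hc]), List.filter_cons_of_neg (by simp [hc]),
          ih (pvBump f (cls t))]
        have h1 : pvBump f (cls t) c = f c := by simp [pvBump, Ne.symm hc]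
        rw [h1]
      · rw [if_neg hlt, ih f, List.filter_cons_of_neg (by simp [hc])]

theorem pvCap_sublist {α : Type} (cls : α → String) :
    ∀ (L : List α) (f : String → Nat), (pvCap cls L f).Sublist L := by
  
  intro L
  induction L with
  | nil => intro f; simp [pvCap]
  | cons t ts ih =>
    intro f
    simp only [pvCap]
    split_ifs
    · exact (ih _).cons₂ t
    · exact (ih _).cons t

-- tags in pvMt are strictly lexicographically increasing
theorem pvMt_pairwise (rows : List (List (String × String))) :
    (pvMt rows).Pairwise (fun a b => a.1 < b.1 ∨ (a.1 = b.1 ∧ a.2.1 < b.2.1)) := by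
  
  unfold pvMt
  rw [List.flatMap_def]
  rw [List.pairwise_flatten]
  constructor
  · intro l hl
    rw [List.mem_map] at hl
    obtain ⟨p, _, rfl⟩ := hl
    rw [List.pairwise_map]
    have := (PySem.List.pairwise_lt_enumerate pvSignals 0).filter (fun e => pvMatch p.2 e.2)
    exact this.imp (fun {a b} hab => Or.inr ⟨rfl, hab⟩)
  · rw [List.pairwise_map]
    exact (PySem.List.pairwise_lt_enumerate rows 0).imp (fun {p q} hpq => by
      intro x hx y hy
      rw [List.mem_map] at hx hy
      obtain ⟨e, _, rfl⟩ := hx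
      obtain ⟨e', _, rfl⟩ := hy
      exact Or.inl hpq)

-- all classes occurring in pvCM are the class's name
theorem pvCM_names (rows : List (List (String × String))) (ci : Int)
    (sig : String × (List String × List String)) :
    ∀ t ∈ pvCM rows ci sig, pvCls t = sig.1 := by
  
  intro t ht
  unfold pvCM at ht
  rw [List.mem_map] at ht
  obtain ⟨p, _, rfl⟩ := ht
  rfl

-- a filter-map is a flatMap of optional singletons
theorem pv_filter_map_flatMap {α β : Type} (q : α → Bool) (g : α → β) :
    ∀ l : List α, (l.filter q).map g = l.flatMap (fun x => if q x then [g x] else []) := by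
  
  intro l
  induction l with
  | nil => rfl
  | cons x xs ih =>
    by_cases hx : q x
    · simp [hx, ih]
    · simp [hx, ih]

-- a flatMap hitting exactly one entry of a nodup list
theorem pv_flatMap_single {α β : Type} [DecidableEq α] (l : List α) (x : α) (v : List β)
    (hnd : l.Nodup) (hx : x ∈ l) :
    l.flatMap (fun e => if e = x then v else []) = v := by
  induction l with
  | nil => cases hx
  | cons e rest ih =>
    rcases List.mem_cons.1 hx with he | hxr
    · subst he
      have hrest : rest.flatMap (fun e => if e = x then v else []) = [] := by
        rw [List.flatMap_eq_nil_iff]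
        intro r hr
        have : r ≠ x := fun hh => (List.nodup_cons.1 hnd).1 (hh ▸ hr)
        simp [this]
      simp [hrest]
    · have hne : e ≠ x := fun hh => (List.nodup_cons.1 hnd).1 (hh ▸ hxr)
      simp [hne, ih (List.nodup_cons.1 hnd).2 hxr]

-- every signal entry's name is one of the four class names
theorem pvSignals_names : ∀ e ∈ PySem.List.enumerate pvSignals,
    e.2.1 ∈ ["mass_assignment", "ssrf", "auth_bypass", "open_redirect"] := by decide

-- every tagged match carries one of the four class names
theorem pvMt_names (rows : List (List (String × String))) :
    ∀ t ∈ pvMt rows, pvCls t ∈ ["mass_assignment", "ssrf", "auth_bypass", "open_redirect"] := by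
  intro t ht
  unfold pvMt at ht
  rw [List.mem_flatMap] at ht
  obtain ⟨p, _, ht⟩ := ht
  rw [List.mem_map] at ht
  obtain ⟨e, he, rfl⟩ := ht
  exact pvSignals_names e (List.mem_of_mem_filter he)

-- at most one signal entry carries a given class name
theorem pv_filter_uniq {σ : Type} [DecidableEq σ] (c : String) (name : σ → String) (x : σ)
    (hx : name x = c) :
    ∀ (l : List σ) (q : σ → Bool), l.Nodup → x ∈ l → (∀ e ∈ l, name e = c → e = x) →
      l.filter (fun e => decide (name e = c) && q e) = if q x then [x] else [] := by
  
  intro l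
  induction l with
  | nil => intro q _ hx _; cases hx
  | cons e rest ih =>
    intro q hnd hxl huniq
    rcases List.mem_cons.1 hxl with he | hxr
    · subst he
      have hrest : rest.filter (fun e => decide (name e = c) && q e) = [] := by
        rw [List.filter_eq_nil_iff]
        intro r hr
        simp only [Bool.and_eq_true, decide_eq_true_eq, not_and]
        intro hname _
        have : r = x := huniq r (List.mem_cons_of_mem _ hr) hname
        exact absurd (this ▸ hr) (List.nodup_cons.1 hnd).1
      by_cases hq : q x
      · simp [hq, hx, hrest]
      · simp [hq, hrest]
    · have hne : e ≠ x := by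
        intro hh
        exact absurd (hh ▸ hxr) (List.nodup_cons.1 hnd).1
      have hname : name e ≠ c := fun hh => hne (huniq e List.mem_cons_self hh)
      have : rest.filter (fun e => decide (name e = c) && q e) = if q x then [x] else [] :=
        ih q (List.nodup_cons.1 hnd).2 hxr (fun r hr h => huniq r (List.mem_cons_of_mem _ hr) h)
      simp [hname, this]

-- the per-class filter of pvMt is that class's match list
theorem pvMt_filter_name (rows : List (List (String × String))) (ci : Int)
    (sig : String × (List String × List String)) (c : String) (hc : sig.1 = c)
    (hmem : (ci, sig) ∈ PySem.List.enumerate pvSignals)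
    (huniq : ∀ e ∈ PySem.List.enumerate pvSignals, e.2.1 = c → e = (ci, sig))
    (hnd : (PySem.List.enumerate pvSignals).Nodup) :
    (pvMt rows).filter (fun t => decide (pvCls t = c)) = pvCM rows ci sig := by
  subst hc
  
  unfold pvMt
  rw [List.filter_flatMap]
  have h : ∀ p ∈ PySem.List.enumerate rows,
      (((PySem.List.enumerate pvSignals).filter (fun e => pvMatch p.2 e.2)).map
          (fun e => (p.1, e.1, (p.2, e.2.1)))).filter (fun t => decide (pvCls t = sig.1))
        = if pvMatch p.2 sig then [(p.1, ci, (p.2, sig.1))] else [] := by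
    intro p _
    rw [List.filter_map]
    have hpred : ((fun t => decide (pvCls t = sig.1)) ∘ (fun e : Int × (String × (List String × List String)) => ((p.1 : Int), (e.1, (p.2, e.2.1)))))
        = fun e : Int × (String × (List String × List String)) => decide (e.2.1 = sig.1) := by
      funext e; rfl
    rw [hpred, List.filter_filter]
    rw [pv_filter_uniq sig.1 (fun e : Int × (String × (List String × List String)) => e.2.1)
      (ci, sig) rfl (PySem.List.enumerate pvSignals) (fun e => pvMatch p.2 e.2) hnd hmem huniq]
    by_cases hq : pvMatch p.2 sig
    · simp [hq]
    · simp [hq]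
  rw [List.flatMap_congr h]
  unfold pvCM
  rw [pv_filter_map_flatMap]

-- filtering a list all of whose classes are c' by class c
theorem pv_filter_all {α : Type} (cls : α → String) (c c' : String) (l : List α)
    (h : ∀ t ∈ l, cls t = c') :
    l.filter (fun t => decide (cls t = c)) = if c' = c then l else [] := by
  
  split_ifs with hcc
  · subst hcc
    rw [List.filter_eq_self]
    intro t ht
    simp [h t ht]
  · rw [List.filter_eq_nil_iff]
    intro t ht
    simp only [decide_eq_true_eq]
    rw [h t ht]
    exact hcc

-- the per-class filter of picks is the capped class match list
theorem pv_picks_filter_name (rows : List (List (String × String))) (ci : Int)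
    (sig : String × (List String × List String)) (c : String) (hc : sig.1 = c)
    (hmem : (ci, sig) ∈ PySem.List.enumerate pvSignals)
    (huniq : ∀ e ∈ PySem.List.enumerate pvSignals, e.2.1 = c → e = (ci, sig))
    (hnd : (PySem.List.enumerate pvSignals).Nodup) :
    ((PySem.List.enumerate pvSignals).flatMap (fun e => (pvCM rows e.1 e.2).take 3)).filter
        (fun t => decide (pvCls t = c))
      = (pvCM rows ci sig).take 3 := by
  subst hc
  
  rw [List.filter_flatMap]
  have h : ∀ e ∈ PySem.List.enumerate pvSignals,
      ((pvCM rows e.1 e.2).take 3).filter (fun t => decide (pvCls t = sig.1))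
        = if e = (ci, sig) then (pvCM rows ci sig).take 3 else [] := by
    intro e he
    have hnames : ∀ t ∈ (pvCM rows e.1 e.2).take 3, pvCls t = e.2.1 :=
      fun t ht => pvCM_names rows e.1 e.2 t (List.take_subset _ _ ht)
    rw [pv_filter_all pvCls sig.1 e.2.1 _ hnames]
    by_cases he2 : e = (ci, sig)
    · subst he2; simp
    · have : e.2.1 ≠ sig.1 := fun hh => he2 (huniq e he hh)
      simp [this, he2]
  rw [List.flatMap_congr h]
  exact pv_flatMap_single _ _ _ hnd hmem

-- equal per-class filters over a covering nodup name list give a permutation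
theorem pv_perm_of_filters {α : Type} (cls : α → String) :
    ∀ (names : List String) (l1 l2 : List α), names.Nodup →
      (∀ t ∈ l1, cls t ∈ names) → (∀ t ∈ l2, cls t ∈ names) →
      (∀ c ∈ names, l1.filter (fun t => decide (cls t = c)) = l2.filter (fun t => decide (cls t = c))) →
      l1.Perm l2 := by
  
  intro names
  induction names with
  | nil =>
    intro l1 l2 _ h1 h2 _
    have e1 : l1 = [] := List.eq_nil_iff_forall_not_mem.2 (fun t ht => by cases h1 t ht)
    have e2 : l2 = [] := List.eq_nil_iff_forall_not_mem.2 (fun t ht => by cases h2 t ht)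
    rw [e1, e2]
  | cons c cs ih =>
    intro l1 l2 hnd h1 h2 hf
    have key := hf c List.mem_cons_self
    have p1 := List.filter_append_perm (fun t => decide (cls t = c)) l1
    have p2 := List.filter_append_perm (fun t => decide (cls t = c)) l2
    refine (p1.symm.trans ?_).trans p2
    rw [key]
    apply List.Perm.append_left
    apply ih _ _ (List.nodup_cons.1 hnd).2
    · intro t ht
      obtain ⟨htl, htc⟩ := List.mem_filter.1 ht
      rcases List.mem_cons.1 (h1 t htl) with hh | hh
      · simp [hh] at htc
      · exact hh
    · intro t ht
      obtain ⟨htl, htc⟩ := List.mem_filter.1 ht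
      rcases List.mem_cons.1 (h2 t htl) with hh | hh
      · simp [hh] at htc
      · exact hh
    · intro c' hc'
      have hcc : c' ≠ c := fun hh => (List.nodup_cons.1 hnd).1 (hh ▸ hc')
      rw [List.filter_filter, List.filter_filter]
      have hp : (fun t => decide (cls t = c') && !decide (cls t = c)) = (fun t => decide (cls t = c')) := by
        funext t
        by_cases h : cls t = c'
        · simp [h, hcc]
        · simp [h]
      rw [hp]
      exact hf c' (List.mem_cons_of_mem _ hc')

-- sorted2 is sorted with the lexicographic key
theorem pv_sorted2_eq_sorted_lex {α : Type} (xs : List α) (k1 k2 : α → Int) :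
    PySem.List.sorted2 xs k1 k2 = PySem.List.sorted xs (fun x => toLex (k1 x, k2 x)) := by
  
  rw [PySem.List.sorted_eq_foldl_insertBy]
  show xs.foldl (fun acc x => PySem.List.insertBy
      (fun a b => decide (k1 a < k1 b) || (!decide (k1 b < k1 a) && decide (k2 a < k2 b))) x acc) []
    = _
  have hbe : (fun a b => decide (k1 a < k1 b) || (!decide (k1 b < k1 a) && decide (k2 a < k2 b)))
      = (fun a b => decide ((toLex (k1 a, k2 a)) < toLex (k1 b, k2 b))) := by
    funext a b
    rw [Bool.eq_iff_iff]
    simp only [Bool.or_eq_true, Bool.and_eq_true, Bool.not_eq_true', decide_eq_true_eq,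
      decide_eq_false_iff_not, Prod.Lex.lt_iff, ofLex_toLex]
    omega
  rw [hbe]

-- the main identity: sorting B's picks gives the canonical cap
theorem pv_main (rows : List (List (String × String))) :
    PySem.List.sorted2
        ((PySem.List.enumerate pvSignals).flatMap (fun e => (pvCM rows e.1 e.2).take 3))
        (fun t => t.1) (fun t => t.2.1)
      = pvCap pvCls (pvMt rows) (fun _ => 0) := by
  
  rw [pv_sorted2_eq_sorted_lex]
  apply PySem.List.sorted_eq_of_perm_of_pairwise_lt
  · apply pv_perm_of_filters pvCls ["mass_assignment", "ssrf", "auth_bypass", "open_redirect"]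
    · decide
    · intro t ht
      have := (pvCap_sublist pvCls (pvMt rows) (fun _ => 0)).subset ht
      exact pvMt_names rows t this
    · intro t ht
      rw [List.mem_flatMap] at ht
      obtain ⟨e, he, ht⟩ := ht
      have h1 : pvCls t = e.2.1 := pvCM_names rows e.1 e.2 t (List.take_subset _ _ ht)
      rw [h1]
      exact pvSignals_names e he
    · intro c hc
      fin_cases hc
      · rw [pvCap_filter, pvMt_filter_name rows 0 (pvSigAt 0) "mass_assignment" (by decide) (by decide) (by decide) (by decide),
          pv_picks_filter_name rows 0 (pvSigAt 0) "mass_assignment" (by decide) (by decide) (by decide) (by decide)]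
      · rw [pvCap_filter, pvMt_filter_name rows 1 (pvSigAt 1) "ssrf" (by decide) (by decide) (by decide) (by decide),
          pv_picks_filter_name rows 1 (pvSigAt 1) "ssrf" (by decide) (by decide) (by decide) (by decide)]
      · rw [pvCap_filter, pvMt_filter_name rows 2 (pvSigAt 2) "auth_bypass" (by decide) (by decide) (by decide) (by decide),
          pv_picks_filter_name rows 2 (pvSigAt 2) "auth_bypass" (by decide) (by decide) (by decide) (by decide)]
      · rw [pvCap_filter, pvMt_filter_name rows 3 (pvSigAt 3) "open_redirect" (by decide) (by decide) (by decide) (by decide),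
          pv_picks_filter_name rows 3 (pvSigAt 3) "open_redirect" (by decide) (by decide) (by decide) (by decide)]
  · have hp := (pvMt_pairwise rows).sublist (pvCap_sublist pvCls (pvMt rows) (fun _ => 0))
    exact hp.imp (fun {a b} h => by
      rw [Prod.Lex.lt_iff]
      exact h)

theorem select_tests_eq_alt (rows : List (List (String × String))) :
    select_tests rows = select_tests_alt rows := by
  
  rw [pvA_canonical]
  simp only [select_tests_alt]
  rw [pvB_picks_eq, pv_main]

-- ===== VERDICT (by name: the statement is the Claim_ definition above) =====
theorem select_tests_spec : Claim_equal_select_tests := by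
  intro rows _
  unfold Spec_select_tests
  exact select_tests_eq_alt rows
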